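-- pv_equiv track=rewrite | github.com/bambamshivam/LeetCode | Weekly_Contest_261/B.py | missingRolls
-- ===== SOURCE A (Python) =====
-- from typing import List
--
-- def missingRolls(rolls: List[int], mean: int, n: int) -> List[int]:
--     s=sum(rolls)
--     m=len(rolls)
--     s1=mean*(m+n) - s
--     l=[0]*n
--     while s1>0:
--         for i in range(n):
--             if s1<=0:
--                 break
--             l[i]+=1
--             s1-=1
--         if s1<=0:
--             break
--     if max(l)>6 or min(l)<1:
--         return []
--     return l
-- ===== SOURCE B (Python) =====
-- def missingRolls(rolls, mean, n):
--     s1 = mean * (len(rolls) + n) - sum(rolls)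
--     if s1 < n or s1 > 6 * n:
--         return []
--     q, r = divmod(s1, n)
--     return [q + 1] * r + [q] * (n - r)
-- ===== Notes on version B (the rewrite author's own statement) =====
-- stated objective: faster
-- what changed: Replaces the unit-by-unit round-robin while/for distribution loop with a closed-form divmod: the first s1%n buckets get s1//n+1, the rest s1//n, and the validity test becomes the arithmetic range check n <= s1 <= 6n.
import Mathlib
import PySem

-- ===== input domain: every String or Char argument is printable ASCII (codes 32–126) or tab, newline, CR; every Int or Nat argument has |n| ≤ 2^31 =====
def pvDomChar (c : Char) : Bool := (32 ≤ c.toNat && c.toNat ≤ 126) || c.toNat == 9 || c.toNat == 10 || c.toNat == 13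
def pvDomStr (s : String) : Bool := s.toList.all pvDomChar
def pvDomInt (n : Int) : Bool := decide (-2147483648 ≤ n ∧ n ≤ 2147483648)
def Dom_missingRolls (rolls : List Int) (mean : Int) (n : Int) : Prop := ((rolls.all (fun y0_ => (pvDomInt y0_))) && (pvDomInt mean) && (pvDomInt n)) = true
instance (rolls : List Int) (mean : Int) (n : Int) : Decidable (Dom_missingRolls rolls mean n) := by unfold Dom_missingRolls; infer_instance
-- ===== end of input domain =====

-- B replaces A's unit-by-unit round-robin distribution loop with a closed-form divmod split (faster).

-- ===== PORT A =====
-- one 'for i in range(n)' pass over l: l[i] += 1 and s1 -= 1, breaking when s1 <= 0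
def pvInnerA : List Int → Int → List Int × Int
  | [], s1 => ([], s1)
  | x :: xs, s1 =>
      if s1 ≤ 0 then (x :: xs, s1)
      else
        let p := pvInnerA xs (s1 - 1)
        ((x + 1) :: p.1, p.2)

-- the 'while s1 > 0' loop; fuel = s1.toNat bounds the iteration count (each pass with n ≥ 1 lowers s1)
def pvOuterA : Nat → List Int → Int → List Int
  | 0, l, _ => l
  | fuel + 1, l, s1 =>
      if s1 > 0 then
        let p := pvInnerA l s1
        if p.2 ≤ 0 then p.1 else pvOuterA fuel p.1 p.2
      else l

def missingRolls (rolls : List Int) (mean : Int) (n : Int) : List Int :=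
  let s := rolls.sum
  let m := (rolls.length : Int)
  let s1 := mean * (m + n) - s
  let l := pvOuterA s1.toNat (List.replicate n.toNat 0) s1
  match PySem.List.max? l (fun y => y), PySem.List.min? l (fun y => y) with
  | some mx, some mn => if mx > 6 ∨ mn < 1 then [] else l
  | _, _ => []   -- Python's max()/min() raise on the empty list; excluded by Pre_

-- ===== PORT B =====
def missingRolls_alt (rolls : List Int) (mean : Int) (n : Int) : List Int :=
  let s1 := mean * ((rolls.length : Int) + n) - rolls.sum
  if s1 < n ∨ s1 > 6 * n then []
  else
    let q := PySem.Int.floordiv s1 n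
    let r := PySem.Int.mod s1 n
    List.replicate r.toNat (q + 1) ++ List.replicate (n - r).toNat q

-- ===== PRECONDITION & SPEC =====
-- Pre_ excludes n ≤ 0 only: there A raises ValueError on max([]) (s1 ≤ 0) or loops forever (s1 > 0).
def Pre_missingRolls (rolls : List Int) (mean : Int) (n : Int) : Prop := 1 ≤ n
instance (rolls : List Int) (mean : Int) (n : Int) : Decidable (Pre_missingRolls rolls mean n) := by unfold Pre_missingRolls; infer_instance
def pvWitness_missingRolls : List Int × Int × Int := ([3, 2, 4, 3], 4, 2)

def Spec_missingRolls (rolls : List Int) (mean : Int) (n : Int) (out : List Int) : Prop := out = missingRolls_alt rolls mean n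
instance (rolls : List Int) (mean : Int) (n : Int) (out : List Int) : Decidable (Spec_missingRolls rolls mean n out) := by unfold Spec_missingRolls; infer_instance

-- ===== CLAIM (what is proved, stated in full; the proofs are below) =====
def Claim_equal_missingRolls : Prop := ∀ (rolls : List Int) (mean : Int) (n : Int), Dom_missingRolls rolls mean n → Pre_missingRolls rolls mean n → Spec_missingRolls rolls mean n (missingRolls rolls mean n)

-- ===== LEMMAS AND PROOFS =====

-- a full pass: every entry gets +1 and s1 drops by n
theorem pvInnerA_full (k : Int) : ∀ (n : Nat) (s1 : Int), (n : Int) ≤ s1 →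
    pvInnerA (List.replicate n k) s1 = (List.replicate n (k + 1), s1 - n) := by
  intro n
  induction n with
  | zero => intro s1 _; simp [pvInnerA]
  | succ m ih =>
      intro s1 hs
      have h1 : ¬ s1 ≤ 0 := by push_cast at hs; omega
      rw [List.replicate_succ]
      simp only [pvInnerA, if_neg h1]
      rw [ih (s1 - 1) (by push_cast at hs ⊢; omega)]
      simp only [Prod.mk.injEq]
      refine ⟨by rw [List.replicate_succ], by push_cast; ring⟩

-- a partial pass: the first s1 entries get +1 and s1 drops to 0
theorem pvInnerA_partial (k : Int) : ∀ (n : Nat) (s1 : Int), 0 ≤ s1 → s1 < (n : Int) →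
    pvInnerA (List.replicate n k) s1 =
      (List.replicate s1.toNat (k + 1) ++ List.replicate (n - s1.toNat) k, 0) := by
  intro n
  induction n with
  | zero => intro s1 h0 hn; omega
  | succ m ih =>
      intro s1 h0 hn
      rcases eq_or_lt_of_le h0 with h | h
      · rw [List.replicate_succ]
        simp [pvInnerA, ← h, ← List.replicate_succ]
      · have h1 : ¬ s1 ≤ 0 := by omega
        rw [List.replicate_succ]
        simp only [pvInnerA, if_neg h1]
        rw [ih (s1 - 1) (by omega) (by push_cast at hn ⊢; omega)]
        have ht : s1.toNat = (s1 - 1).toNat + 1 := by omega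
        have ht2 : m - (s1 - 1).toNat = m + 1 - s1.toNat := by omega
        rw [ht, ht2, List.replicate_succ]
        simp only [List.cons_append, Prod.mk.injEq, List.cons.injEq, true_and]
        refine ⟨?_, trivial⟩
        have he : m + 1 - s1.toNat = m + 1 - ((s1 - 1).toNat + 1) := by omega
        rw [he]

theorem pvOuterA_spec : ∀ (fuel : Nat) (n : Nat) (k s1 : Int), 0 < n → 0 < s1 → s1.toNat ≤ fuel →
    pvOuterA fuel (List.replicate n k) s1 =
      List.replicate (s1 % (n : Int)).toNat (k + s1 / (n : Int) + 1) ++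
        List.replicate (n - (s1 % (n : Int)).toNat) (k + s1 / (n : Int)) := by
  intro fuel
  induction fuel with
  | zero => intro n k s1 hn hs hf; omega
  | succ f ih =>
      intro n k s1 hn hs hf
      simp only [pvOuterA, if_pos hs]
      by_cases hbig : (n : Int) ≤ s1
      · rw [pvInnerA_full k n s1 hbig]
        by_cases hend : s1 - (n : Int) ≤ 0
        · have heq : s1 = (n : Int) := by omega
          have hmod : s1 % (n : Int) = 0 := by rw [heq]; simp
          have hdiv : s1 / (n : Int) = 1 := by rw [heq]; exact Int.ediv_self (by omega)
          simp [hend, hmod, hdiv]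
        · simp only [if_neg hend]
          rw [ih n (k + 1) (s1 - n) hn (by omega) (by omega)]
          have hmod : (s1 - (n : Int)) % (n : Int) = s1 % (n : Int) :=
            Int.sub_emod_right s1 (n : Int)
          have hdiv : (s1 - (n : Int)) / (n : Int) = s1 / (n : Int) - 1 := by
            have := Int.add_mul_ediv_right s1 (-1) (show (n : Int) ≠ 0 by omega)
            have he : s1 + -1 * (n : Int) = s1 - (n : Int) := by ring
            rw [he] at this
            omega
          rw [hmod, hdiv]
          ring_nf
      · push_neg at hbig
        rw [pvInnerA_partial k n s1 (by omega) hbig]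
        have hmod : s1 % (n : Int) = s1 := Int.emod_eq_of_lt (by omega) hbig
        have hdiv : s1 / (n : Int) = 0 := Int.ediv_eq_zero_of_lt (by omega) hbig
        simp [hmod, hdiv]

-- membership in the two-block list forces the value to be q+1 or q
theorem mem_two_blocks {a b : Nat} {x y v : Int}
    (h : v ∈ List.replicate a x ++ List.replicate b y) : v = x ∨ v = y := by
  rcases List.mem_append.mp h with h | h
  · exact Or.inl (List.eq_of_mem_replicate h)
  · exact Or.inr (List.eq_of_mem_replicate h)

theorem missingRolls_spec : Claim_equal_missingRolls := by
  unfold Claim_equal_missingRolls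
  intro rolls mean n _ hPre
  unfold Spec_missingRolls Pre_missingRolls at *
  unfold missingRolls missingRolls_alt
  simp only
  set S : Int := mean * ((rolls.length : Int) + n) - rolls.sum with hS
  have hn0 : (0 : Int) < n := by omega
  have hncast : ((n.toNat : Int)) = n := by omega
  by_cases hpos : 0 < S
  · -- the loop runs; l is the divmod split
    have hq0 : 0 ≤ S / n := Int.ediv_nonneg (by omega) (by omega)
    have hr0 : 0 ≤ S % n := Int.emod_nonneg S (by omega)
    have hrn : S % n < n := Int.emod_lt_of_pos S hn0
    have hsplit : n * (S / n) + S % n = S := Int.ediv_add_emod S n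
    set q : Int := S / n with hqdef
    set r : Int := S % n with hrdef
    have hl : pvOuterA S.toNat (List.replicate n.toNat 0) S =
        List.replicate r.toNat (q + 1) ++ List.replicate (n.toNat - r.toNat) q := by
      have := pvOuterA_spec S.toNat n.toNat 0 S (by omega) hpos (le_refl _)
      rw [hncast] at this
      simpa using this
    rw [hl]
    -- extrema of the two-block list
    set l : List Int := List.replicate r.toNat (q + 1) ++ List.replicate (n.toNat - r.toNat) q with hldef
    have hqmem : q ∈ l := by
      rw [hldef]
      refine List.mem_append.mpr (Or.inr ?_)
      exact List.mem_replicate.mpr ⟨by omega, rfl⟩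
    have hlne : l ≠ [] := by intro h; rw [h] at hqmem; exact (List.not_mem_nil).elim hqmem
    obtain ⟨mx, hmx⟩ : ∃ mx, PySem.List.max? l (fun y => y) = some mx := by
      cases h : PySem.List.max? l (fun y => y) with
      | none => exact absurd ((PySem.List.max?_eq_none_iff _ _).mp h) hlne
      | some v => exact ⟨v, rfl⟩
    obtain ⟨mn, hmn⟩ : ∃ mn, PySem.List.min? l (fun y => y) = some mn := by
      cases h : PySem.List.min? l (fun y => y) with
      | none => exact absurd ((PySem.List.min?_eq_none_iff _ _).mp h) hlne
      | some v => exact ⟨v, rfl⟩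
    rw [hmx, hmn]
    have hmx_mem := PySem.List.max?_mem hmx
    have hmn_mem := PySem.List.min?_mem hmn
    have hmx_ub := PySem.List.max?_isMax hmx
    have hmn_lb := PySem.List.min?_isMin hmn
    have hmn_eq : mn = q := by
      have h1 := hmn_lb q hqmem
      rcases mem_two_blocks hmn_mem with h | h <;> omega
    have hmx_eq : (0 < r ∧ mx = q + 1) ∨ (r = 0 ∧ mx = q) := by
      by_cases hr : 0 < r
      · left
        refine ⟨hr, ?_⟩
        have hq1 : q + 1 ∈ l := by
          rw [hldef]
          exact List.mem_append.mpr (Or.inl (List.mem_replicate.mpr ⟨by omega, rfl⟩))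
        have := hmx_ub (q + 1) hq1
        rcases mem_two_blocks hmx_mem with h | h <;> omega
      · right
        refine ⟨by omega, ?_⟩
        rcases mem_two_blocks hmx_mem with h | h
        · exfalso
          rw [hldef] at hmx_mem
          rcases List.mem_append.mp hmx_mem with hm | hm
          · have := (List.mem_replicate.mp hm).1; omega
          · have := List.eq_of_mem_replicate hm; omega
        · exact h
    -- relate A's extrema test with B's range test
    have e1 : S < n ↔ q < 1 := by
      constructor
      · intro h; by_contra hq; push_neg at hq; nlinarith
      · intro hq; nlinarith
    have hBcond : (S < n ∨ 6 * n < S) ↔ (6 < mx ∨ mn < 1) := by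
      subst hmn_eq
      rcases hmx_eq with ⟨hr, hmx_eq⟩ | ⟨hr, hmx_eq⟩ <;> subst hmx_eq
      · have e2 : 6 * n < S ↔ 5 < q := by
          constructor
          · intro h; by_contra hq; push_neg at hq; nlinarith
          · intro hq; nlinarith
        rw [e1, e2]; omega
      · have e2 : 6 * n < S ↔ 6 < q := by
          constructor
          · intro h; by_contra hq; push_neg at hq; nlinarith
          · intro hq; nlinarith
        rw [e1, e2]; omega
    have hfd : PySem.Int.floordiv S n = q := by
      rw [PySem.Int.floordiv_eq_ediv_of_pos hn0]
    have hmd : PySem.Int.mod S n = r := by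
      rw [PySem.Int.mod_eq_emod_of_pos hn0]
    show (if mx > 6 ∨ mn < 1 then ([] : List Int) else l) = _
    by_cases hc : 6 < mx ∨ mn < 1
    · rw [if_pos hc, if_pos (hBcond.mpr hc)]
    · rw [if_neg hc, if_neg (fun h => hc (hBcond.mp h))]
      rw [hfd, hmd, hldef]
      congr 1
      congr 1
      omega
  · -- S ≤ 0 : the loop never runs, l is all zeros, min < 1; B: S < n
    have hfuel : S.toNat = 0 := by omega
    rw [hfuel]
    have hz : (0 : Int) ∈ List.replicate n.toNat (0 : Int) :=
      List.mem_replicate.mpr ⟨by omega, rfl⟩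
    have hlne : List.replicate n.toNat (0 : Int) ≠ [] := by
      intro h; rw [h] at hz; exact (List.not_mem_nil).elim hz
    simp only [pvOuterA]
    obtain ⟨mx, hmx⟩ : ∃ mx, PySem.List.max? (List.replicate n.toNat (0 : Int)) (fun y => y) = some mx := by
      cases h : PySem.List.max? (List.replicate n.toNat (0 : Int)) (fun y => y) with
      | none => exact absurd ((PySem.List.max?_eq_none_iff _ _).mp h) hlne
      | some v => exact ⟨v, rfl⟩
    obtain ⟨mn, hmn⟩ : ∃ mn, PySem.List.min? (List.replicate n.toNat (0 : Int)) (fun y => y) = some mn := by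
      cases h : PySem.List.min? (List.replicate n.toNat (0 : Int)) (fun y => y) with
      | none => exact absurd ((PySem.List.min?_eq_none_iff _ _).mp h) hlne
      | some v => exact ⟨v, rfl⟩
    rw [hmx, hmn]
    have hmn0 : mn = 0 := List.eq_of_mem_replicate (PySem.List.min?_mem hmn)
    show (if mx > 6 ∨ mn < 1 then ([] : List Int) else List.replicate n.toNat 0) = _
    rw [if_pos (Or.inr (show mn < 1 by omega)),
        if_pos (Or.inl (show S < n by omega))]
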